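-- pv_equiv track=rewrite | github.com/image-multithresholding/Image-multithresholding | PythonCodes/library/thresholding_base.py | gray_clustering
-- ===== SOURCE A (Python) =====
-- from typing import List, Dict, Tuple, Callable
--
-- def gray_clustering(levels: int, breakPositions: List[int], levelsOffset: int = 0) -> List[List[int]]:
--     clusters = [[]]
--
--     # Iterate over every level.
--     for x in range(levelsOffset, levelsOffset + levels):
--         # If we have to break at this level, start a new list.
--         if x in breakPositions:
--             clusters.append([x])
--         # If not, just add this level to the last created cluster.
--         else:
--             clusters[-1].append(x)
--
--     return clusters
-- ===== SOURCE B (Python) =====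
-- from typing import List
--
-- def gray_clustering(levels: int, breakPositions: List[int], levelsOffset: int = 0) -> List[List[int]]:
--     lo = levelsOffset
--     hi = levelsOffset + levels
--     breaks = sorted(set(b for b in breakPositions if lo <= b < hi))
--     bounds = [lo] + breaks + [hi]
--     return [list(range(a, b)) for a, b in zip(bounds, bounds[1:])]
-- ===== Notes on version B (the rewrite author's own statement) =====
-- stated objective: faster
-- what changed: Instead of scanning every gray level and testing membership in breakPositions, B collects the in-range break positions once (sorted, deduplicated), forms the cluster boundaries, and emits each cluster as one contiguous range between consecutive boundaries.
import Mathlib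
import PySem

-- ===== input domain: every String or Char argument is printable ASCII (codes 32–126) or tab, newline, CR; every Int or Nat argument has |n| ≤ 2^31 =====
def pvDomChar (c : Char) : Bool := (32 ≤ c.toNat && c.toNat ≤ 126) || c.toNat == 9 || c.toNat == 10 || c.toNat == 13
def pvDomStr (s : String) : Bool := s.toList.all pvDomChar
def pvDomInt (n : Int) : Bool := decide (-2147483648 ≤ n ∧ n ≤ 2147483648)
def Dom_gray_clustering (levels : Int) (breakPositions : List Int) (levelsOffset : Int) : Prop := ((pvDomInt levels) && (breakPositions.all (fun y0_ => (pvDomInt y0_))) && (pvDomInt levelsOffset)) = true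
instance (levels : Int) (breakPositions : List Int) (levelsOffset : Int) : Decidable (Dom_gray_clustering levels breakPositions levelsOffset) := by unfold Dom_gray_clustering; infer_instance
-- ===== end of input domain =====

-- B replaces the per-level membership scan by building the cluster boundaries once
-- from the sorted deduplicated in-range break positions and emitting each cluster
-- as one contiguous range (objective: faster).

-- ===== PORT A =====
-- loop body of A: break starts a new cluster, otherwise append to the last cluster
def pvStepA (breakPositions : List Int) (clusters : List (List Int)) (x : Int) : List (List Int) :=
  if x ∈ breakPositions then clusters ++ [[x]]
  else clusters.dropLast ++ [clusters.getLastD [] ++ [x]]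

def gray_clustering (levels : Int) (breakPositions : List Int) (levelsOffset : Int) : List (List Int) :=
  (PySem.List.pyRange levelsOffset (levelsOffset + levels) 1).foldl (pvStepA breakPositions) [[]]

-- ===== PORT B =====
def gray_clustering_alt (levels : Int) (breakPositions : List Int) (levelsOffset : Int) : List (List Int) :=
  let lo := levelsOffset
  let hi := levelsOffset + levels
  let breaks := PySem.List.sorted (PySem.Set.ofList (breakPositions.filter (fun b => decide (lo ≤ b) && decide (b < hi)))) (fun x => x) false
  let bounds := lo :: (breaks ++ [hi])
  (bounds.zip (PySem.List.slice bounds (some 1) none)).map (fun p => PySem.List.pyRange p.1 p.2 1)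

-- ===== PRECONDITION & SPEC =====
def Spec_gray_clustering (levels : Int) (breakPositions : List Int) (levelsOffset : Int) (out : List (List Int)) : Prop := out = gray_clustering_alt levels breakPositions levelsOffset
instance (levels : Int) (breakPositions : List Int) (levelsOffset : Int) (out : List (List Int)) : Decidable (Spec_gray_clustering levels breakPositions levelsOffset out) := by unfold Spec_gray_clustering; infer_instance

-- ===== CLAIM (what is proved, stated in full; the proofs are below) =====
def Claim_equal_gray_clustering : Prop := ∀ (levels : Int) (breakPositions : List Int) (levelsOffset : Int), Dom_gray_clustering levels breakPositions levelsOffset → Spec_gray_clustering levels breakPositions levelsOffset (gray_clustering levels breakPositions levelsOffset)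

-- ===== LEMMAS AND PROOFS =====

/-- the clusters determined by start `a`, interior boundaries `bs` and end `hi` -/
def pvSegs (a : Int) (bs : List Int) (hi : Int) : List (List Int) :=
  match bs with
  | [] => [PySem.List.pyRange a hi 1]
  | b :: t => PySem.List.pyRange a b 1 :: pvSegs b t hi

theorem pvSegs_ne_nil (a : Int) (bs : List Int) (hi : Int) : pvSegs a bs hi ≠ [] := by
  cases bs <;> simp [pvSegs]

theorem pvZipMap (a : Int) (bs : List Int) (hi : Int) :
    (((a :: (bs ++ [hi])).zip (bs ++ [hi])).map (fun p => PySem.List.pyRange p.1 p.2 1))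
      = pvSegs a bs hi := by
  induction bs generalizing a with
  | nil => simp [pvSegs]
  | cons b t ih => simpa [pvSegs] using ih b

theorem pvSegs_break (a : Int) (bs : List Int) (m hi : Int) :
    pvSegs a (bs ++ [m]) hi = pvSegs a bs m ++ [PySem.List.pyRange m hi 1] := by
  induction bs generalizing a with
  | nil => simp [pvSegs]
  | cons b t ih => simp [pvSegs, ih]

theorem pvSegs_extend (a hi : Int) (bs : List Int) (ha : a ≤ hi) (hb : ∀ b ∈ bs, b ≤ hi) :
    (pvSegs a bs hi).dropLast ++ [(pvSegs a bs hi).getLastD [] ++ [hi]] = pvSegs a bs (hi + 1) := by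
  induction bs generalizing a with
  | nil =>
    simp only [pvSegs]
    show [PySem.List.pyRange a hi ++ [hi]] = [PySem.List.pyRange a (hi + 1)]
    rw [PySem.List.pyRange_one_succ_right ha]
  | cons b t ih =>
    have hbhi : b ≤ hi := hb b (by simp)
    have ih' := ih b hbhi (fun x hx => hb x (by simp [hx]))
    have hne : pvSegs b t hi ≠ [] := pvSegs_ne_nil b t hi
    obtain ⟨y, l, hyl⟩ : ∃ y l, pvSegs b t hi = y :: l := by
      cases h : pvSegs b t hi with
      | nil => exact absurd h hne
      | cons y l => exact ⟨y, l, rfl⟩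
    simp only [pvSegs, hyl] at ih' ⊢
    have hdl : (PySem.List.pyRange a b :: y :: l).dropLast
        = PySem.List.pyRange a b :: (y :: l).dropLast := rfl
    rw [hdl, List.cons_append]
    exact congrArg (PySem.List.pyRange a b :: ·) (by simpa using ih')

theorem pvSorted_snoc (bp : List Int) (lo hi : Int) (hmem : hi ∈ bp) (hlo : lo ≤ hi) :
    PySem.List.sorted (PySem.Set.ofList (bp.filter (fun b => decide (lo ≤ b) && decide (b < hi + 1)))) (fun x => x) false
      = PySem.List.sorted (PySem.Set.ofList (bp.filter (fun b => decide (lo ≤ b) && decide (b < hi)))) (fun x => x) false ++ [hi] := by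
  set s := PySem.List.sorted (PySem.Set.ofList (bp.filter (fun b => decide (lo ≤ b) && decide (b < hi)))) (fun x => x) false with hs
  have hmem_s : ∀ x, x ∈ s ↔ (x ∈ bp ∧ lo ≤ x ∧ x < hi) := by
    intro x
    simp [hs, PySem.List.mem_sorted, PySem.Set.mem_ofList, List.mem_filter]
  have hpw_s : s.Pairwise (· < ·) := by
    simpa [hs] using PySem.List.sorted_ofList_pairwise_lt
      (xs := bp.filter (fun b => decide (lo ≤ b) && decide (b < hi)))
  have hpw : (s ++ [hi]).Pairwise (fun a b => a < b) := by
    rw [List.pairwise_append]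
    refine ⟨hpw_s, by simp, ?_⟩
    intro x hx y hy
    rcases List.mem_singleton.mp hy with rfl
    exact ((hmem_s x).mp hx).2.2
  refine PySem.List.sorted_eq_of_perm_of_pairwise_lt _ _ _ ?_ hpw
  have hnodup : (s ++ [hi]).Nodup := hpw.imp (fun h => ne_of_lt h)
  have hnodup' : (PySem.Set.ofList (bp.filter (fun b => decide (lo ≤ b) && decide (b < hi + 1))) : List Int).Nodup :=
    PySem.Set.nodup_ofList _
  rw [List.perm_ext_iff_of_nodup hnodup hnodup']
  intro x
  simp only [List.mem_append, List.mem_singleton, hmem_s x,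
    PySem.Set.mem_ofList, List.mem_filter]
  constructor
  · rintro (⟨hxbp, h1, h2⟩ | rfl)
    · exact ⟨hxbp, by simp; omega⟩
    · exact ⟨hmem, by simp; omega⟩
  · rintro ⟨hxbp, h⟩
    simp at h
    by_cases hx : x = hi
    · exact Or.inr hx
    · exact Or.inl ⟨hxbp, h.1, by omega⟩

theorem pvMain (bp : List Int) (lo : Int) (n : Nat) :
    (PySem.List.pyRange lo (lo + (n : Int)) 1).foldl (pvStepA bp) [[]]
      = pvSegs lo
          (PySem.List.sorted (PySem.Set.ofList (bp.filter (fun b => decide (lo ≤ b) && decide (b < lo + (n : Int))))) (fun x => x) false)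
          (lo + (n : Int)) := by
  induction n with
  | zero =>
    have hfil : bp.filter (fun b => decide (lo ≤ b) && decide (b < lo + ((0 : Nat) : Int))) = [] := by
      apply List.filter_eq_nil_iff.mpr
      intro b _
      simp only [Bool.and_eq_true, decide_eq_true_eq, not_and]
      intro _; omega
    rw [hfil]
    rw [PySem.List.pyRange_one_eq_nil (by omega)]
    rw [show PySem.List.sorted (PySem.Set.ofList ([] : List Int)) (fun x => x) false = [] from rfl]
    simp [pvSegs]
  | succ n ih =>
    have hcast : lo + ((n + 1 : Nat) : Int) = (lo + (n : Int)) + 1 := by push_cast; ring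
    rw [hcast]
    rw [PySem.List.pyRange_one_succ_right (by omega : lo ≤ lo + (n : Int))]
    rw [List.foldl_append, ih]
    by_cases hmem : (lo + (n : Int)) ∈ bp
    · rw [pvSorted_snoc bp lo (lo + (n : Int)) hmem (by omega)]
      rw [pvSegs_break]
      simp [pvStepA, if_pos hmem, PySem.List.pyRange_one_singleton]
    · have hfil : bp.filter (fun b => decide (lo ≤ b) && decide (b < (lo + (n : Int)) + 1))
          = bp.filter (fun b => decide (lo ≤ b) && decide (b < lo + (n : Int))) := by
        apply List.filter_congr
        intro b hbbp
        have hne : b ≠ lo + (n : Int) := fun h => hmem (h ▸ hbbp)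
        have hiff : (b < (lo + (n : Int)) + 1) ↔ (b < lo + (n : Int)) := by omega
        rw [decide_eq_decide.mpr hiff]
      rw [hfil]
      simp only [List.foldl_cons, List.foldl_nil, pvStepA, if_neg hmem]
      apply pvSegs_extend
      · omega
      · intro b hb
        have : b ∈ bp.filter (fun b => decide (lo ≤ b) && decide (b < lo + (n : Int))) := by
          have := (PySem.List.mem_sorted _ _ _ _).mp hb
          exact (PySem.Set.mem_ofList _ _).mp this
        have := (List.mem_filter.mp this).2
        simp at this; omega

theorem pvAltEq (levels : Int) (bp : List Int) (lo : Int) :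
    gray_clustering_alt levels bp lo
      = pvSegs lo
          (PySem.List.sorted (PySem.Set.ofList (bp.filter (fun b => decide (lo ≤ b) && decide (b < lo + levels)))) (fun x => x) false)
          (lo + levels) := by
  unfold gray_clustering_alt
  simp only [PySem.List.slice_from_one, List.tail_cons]
  exact pvZipMap _ _ _

-- ===== VERDICT (by name: the statement is the Claim_ definition above) =====
theorem gray_clustering_spec : Claim_equal_gray_clustering := by
  intro levels bp lo _
  unfold Spec_gray_clustering
  rw [pvAltEq]
  unfold gray_clustering
  by_cases h : 0 ≤ levels
  · have hlv : levels = ((levels.toNat : Nat) : Int) := (Int.toNat_of_nonneg h).symm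
    rw [hlv]
    exact pvMain bp lo levels.toNat
  · rw [PySem.List.pyRange_one_eq_nil (by omega : lo + levels ≤ lo)]
    have hfil : bp.filter (fun b => decide (lo ≤ b) && decide (b < lo + levels)) = [] := by
      apply List.filter_eq_nil_iff.mpr
      intro b _
      simp only [Bool.and_eq_true, decide_eq_true_eq, not_and]
      intro _; omega
    rw [hfil]
    rw [show PySem.List.sorted (PySem.Set.ofList ([] : List Int)) (fun x => x) false = [] from rfl]
    simp [pvSegs, PySem.List.pyRange_one_eq_nil (by omega : lo + levels ≤ lo)]
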